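-- pv_equiv track=rewrite | github.com/ny-a/RTTY | psk31/frame_filter.py | binary_values_to_bit_duration
-- ===== SOURCE A (Python) =====
-- def binary_values_to_bit_duration(binary_values):
--     previous_q_value = 0
--     previous_i_value = 0
--     previous_time = 0
--     current_q_value = 0
--     current_i_value = 0
--     current_time = 0
--     for q_value, i_value, time in binary_values:
--         # use final value after this for loop
--         current_q_value = q_value
--         current_i_value = i_value
--         current_time = time
--         if (
--             previous_q_value != current_q_value or
--             previous_i_value != current_i_value
--         ):
--             yield (
--                 previous_q_value,
--                 previous_i_value,
--                 current_time - previous_time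
--             )
--             previous_q_value = current_q_value
--             previous_i_value = current_i_value
--             previous_time = current_time
--
--     yield (current_q_value, current_i_value, current_time - previous_time)
-- ===== SOURCE B (Python) =====
-- def binary_values_to_bit_duration(binary_values):
--     # A is a generator; equivalence is about the yielded sequence (as a list).
--     # Two passes: collect runs (value + start time) starting from a synthetic
--     # (0,0) run at time 0, then emit each run's duration from the run starts.
--     runs = [(0, 0, 0)]  # (q, i, start_time)
--     last_time = 0
--     for q, i, t in binary_values:
--         if (q, i) != (runs[-1][0], runs[-1][1]):
--             runs.append((q, i, t))
--         last_time = t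
--     out = []
--     for idx in range(len(runs) - 1):
--         q, i, s = runs[idx]
--         out.append((q, i, runs[idx + 1][2] - s))
--     q, i, s = runs[-1]
--     out.append((q, i, last_time - s))
--     return out
-- ===== Notes on version B (the rewrite author's own statement) =====
-- stated objective: alternative
-- what changed: Replaces the inline change-detection generator with a two-pass run-length scheme: first collect the runs (value and start time, seeded with the synthetic (0,0) run at time 0) plus the last element time, then emit durations from consecutive run starts.
import Mathlib
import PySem

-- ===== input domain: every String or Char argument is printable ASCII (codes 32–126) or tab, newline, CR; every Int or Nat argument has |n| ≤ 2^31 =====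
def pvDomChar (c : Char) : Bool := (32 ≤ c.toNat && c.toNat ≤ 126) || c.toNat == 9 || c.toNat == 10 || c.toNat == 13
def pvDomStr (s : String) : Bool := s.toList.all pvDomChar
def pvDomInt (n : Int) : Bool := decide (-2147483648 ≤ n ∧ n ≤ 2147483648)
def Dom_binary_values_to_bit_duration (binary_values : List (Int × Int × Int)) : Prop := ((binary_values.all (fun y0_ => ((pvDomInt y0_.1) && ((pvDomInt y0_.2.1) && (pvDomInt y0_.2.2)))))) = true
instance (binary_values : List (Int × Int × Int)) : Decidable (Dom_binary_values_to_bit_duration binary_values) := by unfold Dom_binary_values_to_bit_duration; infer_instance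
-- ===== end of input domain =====

-- B replaces inline change detection with a two-pass run-length scheme (alternative decomposition).
-- A is a Python generator; the proved equivalence is about the yielded sequence as a list.
-- ===== PORT A =====
def pvGoA : List (Int × Int × Int) → Int → Int → Int → Int → Int → Int → List (Int × Int × Int)
  | [], _, _, pt, cq, ci, ct => [(cq, ci, ct - pt)]
  | (q, i, t) :: rest, pq, pi, pt, _, _, _ =>
    if pq ≠ q ∨ pi ≠ i then
      (pq, pi, t - pt) :: pvGoA rest q i t q i t
    else
      pvGoA rest pq pi pt q i t

def binary_values_to_bit_duration (binary_values : List (Int × Int × Int)) : List (Int × Int × Int) :=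
  pvGoA binary_values 0 0 0 0 0 0

-- ===== PORT B =====
-- pass 1 of Source B: build run list (value, start time) and last_time; the Python appends to
-- `runs`, here the accumulator is kept reversed (cons = append) and reversed at the end.
def pvPass1 : List (Int × Int × Int) → List (Int × Int × Int) → Int → List (Int × Int × Int) × Int
  | [], runsRev, lastTime => (runsRev.reverse, lastTime)
  | (q, i, t) :: rest, runsRev, _ =>
    let runsRev' :=
      match runsRev with
      | (rq, ri, _) :: _ => if (q, i) ≠ (rq, ri) then (q, i, t) :: runsRev else runsRev
      | [] => (q, i, t) :: runsRev
    pvPass1 rest runsRev' t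

-- pass 2 of Source B: each run's duration is the next run's start minus its own start;
-- the final run runs to last_time.
def pvPass2 : List (Int × Int × Int) → Int → List (Int × Int × Int)
  | [], _ => []
  | [(q, i, s)], lastTime => [(q, i, lastTime - s)]
  | (q, i, s) :: (q', i', s') :: rest, lastTime =>
    (q, i, s' - s) :: pvPass2 ((q', i', s') :: rest) lastTime

def binary_values_to_bit_duration_alt (binary_values : List (Int × Int × Int)) : List (Int × Int × Int) :=
  let (runs, lastTime) := pvPass1 binary_values [(0, 0, 0)] 0
  pvPass2 runs lastTime

-- ===== PRECONDITION & SPEC =====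
def Spec_binary_values_to_bit_duration (binary_values : List (Int × Int × Int)) (out : List (Int × Int × Int)) : Prop := out = binary_values_to_bit_duration_alt binary_values
instance (binary_values : List (Int × Int × Int)) (out : List (Int × Int × Int)) : Decidable (Spec_binary_values_to_bit_duration binary_values out) := by unfold Spec_binary_values_to_bit_duration; infer_instance

-- ===== CLAIM (what is proved, stated in full; the proofs are below) =====
def Claim_equal_binary_values_to_bit_duration : Prop := ∀ (binary_values : List (Int × Int × Int)), Dom_binary_values_to_bit_duration binary_values → Spec_binary_values_to_bit_duration binary_values (binary_values_to_bit_duration binary_values)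

-- ===== LEMMAS AND PROOFS =====

theorem pvPass1_acc (rest : List (Int × Int × Int)) (h : Int × Int × Int)
    (rs : List (Int × Int × Int)) (ct : Int) :
    pvPass1 rest (h :: rs) ct
      = (rs.reverse ++ (pvPass1 rest [h] ct).1, (pvPass1 rest [h] ct).2) := by
  induction rest generalizing h rs ct with
  | nil => simp [pvPass1]
  | cons x rest ih =>
    obtain ⟨q, i, t⟩ := x
    obtain ⟨hq, hi, hs⟩ := h
    by_cases hc : (q, i) ≠ (hq, hi)
    · simp only [pvPass1]
      rw [if_pos hc, if_pos hc, ih ((q,i,t)) ((hq,hi,hs) :: rs), ih ((q,i,t)) [(hq,hi,hs)]]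
      simp
    · simp only [pvPass1]
      rw [if_neg hc, if_neg hc]
      exact ih _ _ _

theorem pvPass1_head (rest : List (Int × Int × Int)) (h : Int × Int × Int) (ct : Int) :
    ∃ tl, (pvPass1 rest [h] ct).1 = h :: tl := by
  induction rest generalizing h ct with
  | nil => exact ⟨[], rfl⟩
  | cons x rest ih =>
    obtain ⟨q, i, t⟩ := x
    obtain ⟨hq, hi, hs⟩ := h
    by_cases hc : (q, i) ≠ (hq, hi)
    · simp only [pvPass1]
      rw [if_pos hc, pvPass1_acc]
      exact ⟨(pvPass1 rest [(q,i,t)] t).1, by simp⟩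
    · simp only [pvPass1]
      rw [if_neg hc]
      exact ih _ _

theorem pv_main (rest : List (Int × Int × Int)) (pq pi pt ct : Int) :
    pvPass2 (pvPass1 rest [(pq, pi, pt)] ct).1 (pvPass1 rest [(pq, pi, pt)] ct).2
      = pvGoA rest pq pi pt pq pi ct := by
  induction rest generalizing pq pi pt ct with
  | nil => simp [pvPass1, pvPass2, pvGoA]
  | cons x rest ih =>
    obtain ⟨q, i, t⟩ := x
    by_cases hc : pq ≠ q ∨ pi ≠ i
    · have hc' : (q, i) ≠ (pq, pi) := by
        intro he; injection he with h1 h2; exact hc.elim (fun h => h h1.symm) (fun h => h h2.symm)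
      simp only [pvPass1, pvGoA]
      rw [if_pos hc, if_pos hc', pvPass1_acc]
      obtain ⟨tl, htl⟩ := pvPass1_head rest (q, i, t) t
      simp only [htl, List.reverse_singleton, List.singleton_append]
      simp only [pvPass2]
      rw [← htl, ih]
    · have h1 : pq = q := by by_contra h; exact hc (Or.inl h)
      have h2 : pi = i := by by_contra h; exact hc (Or.inr h)
      subst h1; subst h2
      have hc2 : ¬ ((pq, pi) ≠ (pq, pi)) := by simp
      simp only [pvPass1, pvGoA]
      rw [if_neg hc, if_neg hc2]
      exact ih pq pi pt t

-- ===== VERDICT (by name: the statement is the Claim_ definition above) =====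
theorem binary_values_to_bit_duration_spec : Claim_equal_binary_values_to_bit_duration := by
  intro bv _
  show binary_values_to_bit_duration bv = binary_values_to_bit_duration_alt bv
  unfold binary_values_to_bit_duration binary_values_to_bit_duration_alt
  exact (pv_main bv 0 0 0 0).symm
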